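-- pv_equiv track=rewrite | github.com/rmkohlman/devopsmaestro | .github/scripts/generate-dashboard.py | readme_sprint_velocity
-- ===== SOURCE A (Python) =====
-- from collections import Counter, defaultdict
--
-- def _status(item: dict) -> str:
--     return item.get("status") or "None"
--
-- def _sprint(item: dict) -> str | None:
--     return item.get("sprint") or None
--
-- def readme_sprint_velocity(items: list[dict]) -> str:
--     """Sprint velocity table: completed items per sprint."""
--     done_by_sprint: dict[str, int] = defaultdict(int)
--     hotfixes = 0
--
--     for item in items:
--         if _status(item) != "Done":
--             continue
--         s = _sprint(item)
--         if s:
--             done_by_sprint[s] += 1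
--         else:
--             hotfixes += 1
--
--     if not done_by_sprint and not hotfixes:
--         return "_No completed sprint data._"
--
--     sprint_names = sorted(done_by_sprint.keys())
--     lines = [
--         "| Sprint | Items Completed |",
--         "|--------|----------------|",
--     ]
--     for s in sprint_names:
--         lines.append(f"| {s} | {done_by_sprint[s]} |")
--     if hotfixes:
--         lines.append(f"| _(no sprint / hotfixes)_ | {hotfixes} |")
--
--     return "\n".join(lines)
-- ===== SOURCE B (Python) =====
-- def _runs(srt):
--     """Run-length encode an already-sorted list: one (value, run length) pair per run."""
--     if not srt:
--         return []
--     s = srt[0]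
--     k = 1
--     while k < len(srt) and srt[k] == s:
--         k += 1
--     return [(s, k)] + _runs(srt[k:])
--
-- def readme_sprint_velocity(items: list) -> str:
--     """Sprint velocity table: sort the completed sprint names once and run-length
--     encode them recursively, instead of hash-aggregating counts per sprint."""
--     done = [item.get("sprint") or None for item in items if item.get("status") == "Done"]
--     hotfixes = done.count(None)
--     names = sorted(s for s in done if s is not None)
--     if not names and not hotfixes:
--         return "_No completed sprint data._"
--     rows = _runs(names)
--     if hotfixes:
--         rows = rows + [("_(no sprint / hotfixes)_", hotfixes)]
--     header = "| Sprint | Items Completed |\n|--------|----------------|"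
--     return header + "".join(f"\n| {k} | {v} |" for k, v in rows)
-- ===== Notes on version B (the rewrite author's own statement) =====
-- stated objective: alternative
-- what changed: Replaces the dict-based hash aggregation (per-sprint counter built in a loop, then sorted keys with lookups) by a staged pipeline: one comprehension extracts the completed items' sprints, the real names are sorted once and run-length encoded by a recursive grouping helper, and the table is emitted from the (name, run length) pairs.
import Mathlib
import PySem

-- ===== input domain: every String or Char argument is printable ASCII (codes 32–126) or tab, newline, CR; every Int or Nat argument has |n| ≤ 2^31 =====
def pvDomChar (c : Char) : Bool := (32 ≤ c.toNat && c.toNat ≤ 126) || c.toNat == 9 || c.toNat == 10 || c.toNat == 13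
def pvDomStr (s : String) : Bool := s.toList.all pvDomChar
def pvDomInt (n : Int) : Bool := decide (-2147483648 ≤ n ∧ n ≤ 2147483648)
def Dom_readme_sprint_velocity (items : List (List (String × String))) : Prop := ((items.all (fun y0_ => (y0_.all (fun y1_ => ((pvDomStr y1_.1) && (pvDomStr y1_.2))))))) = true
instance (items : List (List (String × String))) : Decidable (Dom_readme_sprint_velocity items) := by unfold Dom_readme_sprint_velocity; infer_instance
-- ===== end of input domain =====

-- B replaces A's per-sprint hash counter (then sorted keys with dict lookups) by a staged pipeline:
-- extract the completed items' sprints, sort the real names once, run-length encode them with a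
-- recursive grouping helper, and emit the table from the (name, run) pairs; objective: alternative.

-- ===== PORT A =====
-- module helpers _status / _sprint (item.get(k) or default)
def statusHelper (item : List (String × String)) : String :=
  match item.lookup "status" with
  | some s => if s = "" then "None" else s
  | none => "None"

def sprintHelper (item : List (String × String)) : Option String :=
  match item.lookup "sprint" with
  | some s => if s = "" then none else some s
  | none => none

-- the body of A's for-loop: skip non-Done, then count the sprint (defaultdict += 1) or the hotfix
def stepA (acc : PySem.Dict String Int × Int) (item : List (String × String)) :
    PySem.Dict String Int × Int :=
  if statusHelper item ≠ "Done" then acc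
  else match sprintHelper item with
    | some s => (acc.1.modify s 0 (· + 1), acc.2)
    | none => (acc.1, acc.2 + 1)

def readme_sprint_velocity (items : List (List (String × String))) : String :=
  let st := items.foldl stepA (PySem.Dict.empty, 0)
  if st.1.items.isEmpty && st.2 == 0 then "_No completed sprint data._"
  else
    let sprint_names := PySem.List.sorted st.1.keys (fun x => x) false
    let lines := ["| Sprint | Items Completed |", "|--------|----------------|"]
      ++ sprint_names.map (fun s => "| " ++ s ++ " | " ++ PySem.Int.toStr (st.1.getD s 0) ++ " |")
      ++ (if st.2 != 0 then ["| _(no sprint / hotfixes)_ | " ++ PySem.Int.toStr st.2 ++ " |"] else [])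
    PySem.Str.join "\n" lines

-- ===== PORT B =====
-- B's _runs: run-length encode an already-sorted list, recursively (the inner while loop
-- counts the prefix of elements equal to the head = takeWhile; the recursive call gets the rest)
def runsB : List String → List (String × Int)
  | [] => []
  | x :: xs =>
    (x, ((xs.takeWhile (· == x)).length : Int) + 1) :: runsB (xs.dropWhile (· == x))
termination_by l => l.length
decreasing_by
  simpa using Nat.lt_succ_of_le (List.dropWhile_sublist (l := xs) (p := (· == x))).length_le

-- B's 'item.get("sprint") or None'
def sprintOfB (item : List (String × String)) : Option String :=
  (item.lookup "sprint").bind (fun s => if s = "" then none else some s)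

def readme_sprint_velocity_alt (items : List (List (String × String))) : String :=
  let done := items.filterMap (fun it =>
    if it.lookup "status" == some "Done" then some (sprintOfB it) else none)
  let hotfixes := PySem.List.count done none
  let names := PySem.List.sorted (done.filterMap id) (fun x => x) false
  if names.isEmpty && hotfixes == 0 then "_No completed sprint data._"
  else
    let rows := runsB names
      ++ (if hotfixes != 0 then [("_(no sprint / hotfixes)_", (hotfixes : Int))] else [])
    "| Sprint | Items Completed |\n|--------|----------------|"
      ++ PySem.Str.join "" (rows.map (fun p => "\n| " ++ p.1 ++ " | " ++ PySem.Int.toStr p.2 ++ " |"))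

-- ===== PRECONDITION & SPEC =====
def Spec_readme_sprint_velocity (items : List (List (String × String))) (out : String) : Prop := out = readme_sprint_velocity_alt items
instance (items : List (List (String × String))) (out : String) : Decidable (Spec_readme_sprint_velocity items out) := by unfold Spec_readme_sprint_velocity; infer_instance

-- ===== CLAIM (what is proved, stated in full; the proofs are below) =====
def Claim_equal_readme_sprint_velocity : Prop := ∀ (items : List (List (String × String))), Dom_readme_sprint_velocity items → Spec_readme_sprint_velocity items (readme_sprint_velocity items)

-- ===== LEMMAS AND PROOFS =====

-- the completed sprint names, in input order, and the hotfix count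
def nsOf (items : List (List (String × String))) : List String :=
  items.filterMap (fun it => if statusHelper it = "Done" then sprintHelper it else none)

def hcOf (items : List (List (String × String))) : Nat :=
  items.countP (fun it => statusHelper it = "Done" && (sprintHelper it).isNone)

-- B's first stage, named for the proofs
def doneOf (items : List (List (String × String))) : List (Option String) :=
  items.filterMap (fun it =>
    if it.lookup "status" == some "Done" then some (sprintOfB it) else none)

lemma sprintB_eq (it : List (String × String)) : sprintOfB it = sprintHelper it := by
  unfold sprintOfB sprintHelper
  cases it.lookup "sprint" <;> simp

lemma status_done (it : List (String × String)) :
    (statusHelper it = "Done") ↔ it.lookup "status" = some "Done" := by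
  unfold statusHelper
  cases h : it.lookup "status" with
  | none => simp
  | some s => by_cases hs : s = "" <;> simp [hs]

lemma doneOf_filterMap (items : List (List (String × String))) :
    (doneOf items).filterMap id = nsOf items := by
  unfold doneOf nsOf
  rw [List.filterMap_filterMap]
  refine List.filterMap_congr (fun it _ => ?_)
  by_cases hs : statusHelper it = "Done"
  · have hb : (it.lookup "status" == some "Done") = true := by
      simpa using (status_done it).mp hs
    simp [hb, hs, sprintB_eq]
  · have hb : (it.lookup "status" == some "Done") = false := by
      simpa using fun h => hs ((status_done it).mpr h)
    simp [hb, hs]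

lemma doneOf_count (items : List (List (String × String))) :
    (doneOf items).count none = hcOf items := by
  induction items with
  | nil => rfl
  | cons it rest ih =>
    by_cases hs : statusHelper it = "Done"
    · have hp : it.lookup "status" = some "Done" := (status_done it).mp hs
      have hcons : doneOf (it :: rest) = sprintHelper it :: doneOf rest := by
        simp [doneOf, hp, sprintB_eq]
      rw [hcons]
      cases hsp : sprintHelper it with
      | none => simp [ih, hcOf, hs, hsp]
      | some s => simp [ih, hcOf, hs, hsp]
    · have hp : ¬ it.lookup "status" = some "Done" := fun h => hs ((status_done it).mpr h)
      have hcons : doneOf (it :: rest) = doneOf rest := by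
        simp [doneOf, hp]
      rw [hcons, ih]
      simp [hcOf, hs]

lemma loopA_eq (items : List (List (String × String))) (d : PySem.Dict String Int) (h : Int) :
    items.foldl stepA (d, h)
    = ((nsOf items).foldl (fun d x => d.modify x 0 (· + 1)) d, h + (hcOf items : Int)) := by
  induction items generalizing d h with
  | nil => simp [nsOf, hcOf]
  | cons it rest ih =>
    rw [List.foldl_cons]
    by_cases hs : statusHelper it = "Done"
    · cases hsp : sprintHelper it with
      | some s =>
        rw [show stepA (d, h) it = (d.modify s 0 (· + 1), h) by simp [stepA, hs, hsp], ih]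
        simp [nsOf, hcOf, hs, hsp]
      | none =>
        rw [show stepA (d, h) it = (d, h + 1) by simp [stepA, hs, hsp], ih]
        simp only [nsOf, hcOf] at *
        simp [hs, hsp]
        omega
    · rw [show stepA (d, h) it = (d, h) by simp [stepA, hs], ih]
      simp [nsOf, hcOf, hs]

lemma mem_fst_runsB (l : List String) (k : String) : k ∈ (runsB l).map Prod.fst ↔ k ∈ l := by
  induction l using runsB.induct with
  | case1 => simp [runsB]
  | case2 x xs ih =>
    rw [runsB]
    constructor
    · rintro h
      simp only [List.map_cons, List.mem_cons] at h
      rcases h with h | h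
      · simp [h]
      · have := (ih.mp (by simpa using h))
        have : k ∈ xs := (List.dropWhile_sublist _).mem this
        simp [this]
    · intro h
      rcases List.mem_cons.mp h with h | h
      · simp [h]
      · rw [← List.takeWhile_append_dropWhile (p := (· == x)) (l := xs)] at h
        rcases List.mem_append.mp h with h | h
        · have : k = x := by simpa using List.mem_takeWhile_imp h
          simp [this]
        · simp [ih.mpr h]

lemma lt_of_mem_dropWhile {x : String} {xs : List String} (hp : (x :: xs).Pairwise (· ≤ ·))
    {e : String} (he : e ∈ xs.dropWhile (· == x)) : x < e := by
  have hx : ∀ y ∈ xs, x ≤ y := (List.pairwise_cons.mp hp).1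
  have hpw : (xs.dropWhile (· == x)).Pairwise (· ≤ ·) :=
    (List.pairwise_cons.mp hp).2.sublist (List.dropWhile_sublist _)
  cases hd : xs.dropWhile (· == x) with
  | nil => rw [hd] at he; simp at he
  | cons d r =>
    have hdx : (d == x) = false := by
      have h0 := List.head?_dropWhile_not (· == x) xs
      rw [hd] at h0; simpa using h0
    have hdne : d ≠ x := by simpa using hdx
    have hdm : d ∈ xs := (List.dropWhile_sublist (p := (· == x)) (l := xs)).subset (by rw [hd]; simp)
    have hxd : x < d := lt_of_le_of_ne (hx d hdm) (Ne.symm hdne)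
    rw [hd] at he hpw
    rcases List.mem_cons.mp he with h | h
    · exact h ▸ hxd
    · exact lt_of_lt_of_le hxd ((List.pairwise_cons.mp hpw).1 e h)

lemma pairwise_fst_runsB (l : List String) (hp : l.Pairwise (· ≤ ·)) :
    ((runsB l).map Prod.fst).Pairwise (· < ·) := by
  induction l using runsB.induct with
  | case1 => simp [runsB]
  | case2 x xs ih =>
    rw [runsB]
    simp only [List.map_cons, List.pairwise_cons]
    constructor
    · intro k hk
      exact lt_of_mem_dropWhile hp ((mem_fst_runsB _ _).mp hk)
    · exact ih ((List.pairwise_cons.mp hp).2.sublist (List.dropWhile_sublist _))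

lemma count_takeWhile_self (x : String) (xs : List String) :
    List.count x (xs.takeWhile (· == x)) = (xs.takeWhile (· == x)).length := by
  apply List.count_eq_length.mpr
  intro b hb
  have : b = x := by simpa using List.mem_takeWhile_imp hb
  exact this.symm

lemma snd_runsB (l : List String) (hp : l.Pairwise (· ≤ ·)) :
    ∀ p ∈ runsB l, p.2 = (List.count p.1 l : Int) := by
  induction l using runsB.induct with
  | case1 => simp [runsB]
  | case2 x xs ih =>
    rw [runsB]
    intro p hpmem
    have hsplit : xs = xs.takeWhile (· == x) ++ xs.dropWhile (· == x) :=
      (List.takeWhile_append_dropWhile (p := (· == x)) (l := xs)).symm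
    rcases List.mem_cons.mp hpmem with h | h
    · subst h
      have hnd : x ∉ xs.dropWhile (· == x) := fun hmem =>
        lt_irrefl x (lt_of_mem_dropWhile hp hmem)
      have hcd : List.count x (xs.dropWhile (· == x)) = 0 := List.count_eq_zero.mpr hnd
      have hcx : List.count x xs = (xs.takeWhile (· == x)).length := by
        nth_rewrite 1 [hsplit]
        rw [List.count_append, count_takeWhile_self, hcd]
        omega
      simp [List.count_cons_self, hcx]
    · have hpw : (xs.dropWhile (· == x)).Pairwise (· ≤ ·) :=
        (List.pairwise_cons.mp hp).2.sublist (List.dropWhile_sublist _)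
      have hrec := ih hpw p h
      have hx_lt : x < p.1 :=
        lt_of_mem_dropWhile hp ((mem_fst_runsB _ _).mp (List.mem_map_of_mem h))
      have hct : List.count p.1 (xs.takeWhile (· == x)) = 0 :=
        List.count_eq_zero.mpr (fun hmem =>
          (ne_of_gt hx_lt) (by simpa using List.mem_takeWhile_imp hmem))
      have hcx2 : List.count p.1 xs = List.count p.1 (xs.dropWhile (· == x)) := by
        nth_rewrite 1 [hsplit]
        rw [List.count_append, hct]
        omega
      rw [hrec]
      simp [hcx2, ne_of_lt hx_lt]

lemma ofList_eq_nil_iff (l : List String) : PySem.Set.ofList l = [] ↔ l = [] := by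
  cases l with
  | nil => simp
  | cons a t =>
    constructor
    · intro h
      have : a ∈ PySem.Set.ofList (a :: t) := (PySem.Set.mem_ofList _ _).mpr (by simp)
      rw [h] at this; simp at this
    · intro h; simp at h

-- A's sorted-keys rows = the run-length pairs of the sorted name list, formatted
lemma rows_eq (ns : List String) :
    (PySem.List.sorted (PySem.Set.ofList ns) (fun x => x) false).map
        (fun s => "| " ++ s ++ " | " ++ PySem.Int.toStr ((PySem.Dict.counter ns).getD s 0) ++ " |")
    = (runsB (PySem.List.sorted ns (fun x => x) false)).map
        (fun p => "| " ++ p.1 ++ " | " ++ PySem.Int.toStr p.2 ++ " |") := by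
  set l := PySem.List.sorted ns (fun x => x) false with hldef
  have hpl : l.Pairwise (· ≤ ·) := PySem.List.sorted_pairwise ns (fun x => x)
  have hperm : l.Perm ns := PySem.List.sorted_perm ns (fun x => x) false
  have hfst : PySem.List.sorted (PySem.Set.ofList ns) (fun x => x) false = (runsB l).map Prod.fst := by
    apply PySem.List.sorted_eq_of_perm_of_pairwise_lt
    · rw [List.perm_ext_iff_of_nodup ((pairwise_fst_runsB l hpl).imp ne_of_lt)
        (PySem.Set.nodup_ofList ns)]
      intro a
      rw [mem_fst_runsB, PySem.Set.mem_ofList]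
      exact hperm.mem_iff
    · exact pairwise_fst_runsB l hpl
  rw [hfst, List.map_map]
  refine List.map_congr_left ?_
  intro p hpmem
  have h2 := snd_runsB l hpl p hpmem
  have hc := PySem.Dict.getD_counter ns p.1
  have hcnt : List.count p.1 l = List.count p.1 ns := hperm.count_eq p.1
  simp [Function.comp, hc, h2, hcnt]

-- ''.join with the separator folded into the parts equals sep.join
lemma chars_join_nil_cons (a : List Char) (bs : List (List Char)) :
    PySem.Chars.join [] (a :: bs) = a ++ PySem.Chars.join [] bs := by
  cases bs with
  | nil => simp [PySem.Chars.join_singleton, PySem.Chars.join_nil]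
  | cons b r => rw [PySem.Chars.join_cons_cons]; simp

lemma chars_join_one (sep : List Char) (x : List Char) (l : List (List Char)) :
    PySem.Chars.join sep (x :: l) = x ++ PySem.Chars.join [] (l.map (fun r => sep ++ r)) := by
  induction l generalizing x with
  | nil => simp [PySem.Chars.join_singleton, PySem.Chars.join_nil]
  | cons y t ih =>
    rw [PySem.Chars.join_cons_cons, ih y]
    rw [List.map_cons, chars_join_nil_cons]
    simp

lemma join_split (h1 h2 : String) (body : List String) :
    PySem.Str.join "\n" (h1 :: h2 :: body)
    = (h1 ++ "\n" ++ h2) ++ PySem.Str.join "" (body.map (fun r => "\n" ++ r)) := by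
  apply String.toList_inj.mp
  simp only [PySem.Str.toList_join, String.toList_append, List.map_cons, List.map_map]
  rw [chars_join_one, List.map_cons, chars_join_nil_cons]
  have hnil : ("" : String).toList = [] := rfl
  rw [hnil]
  have hmap : (body.map (String.toList ∘ fun r => "\n" ++ r))
      = (body.map String.toList).map (fun r => "\n".toList ++ r) := by
    simp [Function.comp_def, String.toList_append]
  rw [hmap]
  simp [List.append_assoc]

-- prefixing a row of A's table with the newline gives B's row format
lemma row_newline (s t : String) :
    "\n" ++ ("| " ++ s ++ " | " ++ t ++ " |") = "\n| " ++ s ++ " | " ++ t ++ " |" := by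
  simp [← String.append_assoc]

lemma hot_split (t : String) :
    "| _(no sprint / hotfixes)_ | " ++ t ++ " |"
    = "| " ++ "_(no sprint / hotfixes)_" ++ " | " ++ t ++ " |" := by
  simp

lemma main_eq (items : List (List (String × String))) :
    readme_sprint_velocity items = readme_sprint_velocity_alt items := by
  unfold readme_sprint_velocity readme_sprint_velocity_alt
  rw [loopA_eq]
  simp only []
  rw [← PySem.Dict.counter_eq_foldl (nsOf items)]
  rw [show (items.filterMap (fun it =>
      if it.lookup "status" == some "Done" then some (sprintOfB it) else none)) = doneOf items
    from rfl]
  rw [doneOf_filterMap, PySem.List.count_eq, doneOf_count]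
  set ns := nsOf items with hns
  set hc := hcOf items with hhc
  -- the two emptiness tests agree
  have hcondA : (PySem.Dict.counter ns).items.isEmpty = ns.isEmpty := by
    rw [PySem.Dict.items_counter]
    cases h : ns with
    | nil => simp
    | cons a t =>
      cases hof : PySem.Set.ofList (a :: t) with
      | nil => exact absurd ((ofList_eq_nil_iff _).mp hof) (by simp)
      | cons b u => simp
  have hcondB : (PySem.List.sorted ns (fun x => x) false).isEmpty = ns.isEmpty := by
    by_cases h : ns = []
    · simp [h, (PySem.List.sorted_eq_nil_iff ([] : List String) (fun x => x) false).mpr rfl]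
    · have h2 : PySem.List.sorted ns (fun x => x) false ≠ [] := fun he =>
        h ((PySem.List.sorted_eq_nil_iff ns (fun x => x) false).mp he)
      obtain ⟨a, t, hat⟩ := List.exists_cons_of_ne_nil h2
      obtain ⟨b, u, hbu⟩ := List.exists_cons_of_ne_nil h
      rw [hat, hbu]
      rfl
  have hint : ((0 + (hc : Int)) == 0) = (hc == 0) := by
    by_cases h : hc = 0 <;> simp [h]
  rw [hcondA, hcondB, hint, PySem.Dict.keys_counter]
  have hzero : (0 + (hc : Int)) = (hc : Int) := by omega
  rw [hzero]
  by_cases hempty : (ns.isEmpty && (hc == 0)) = true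
  · rw [if_pos hempty, if_pos hempty]
  · rw [if_neg hempty, if_neg hempty]
    rw [show ∀ (X Y : List String),
        (["| Sprint | Items Completed |", "|--------|----------------|"] ++ X) ++ Y
        = "| Sprint | Items Completed |" :: "|--------|----------------|" :: (X ++ Y)
      from fun X Y => by simp]
    rw [join_split]
    rw [show ("| Sprint | Items Completed |" : String) ++ "\n" ++ "|--------|----------------|"
        = "| Sprint | Items Completed |\n|--------|----------------|" from rfl]
    congr 1
    congr 1
    rw [List.map_append, List.map_append, rows_eq, List.map_map]
    refine congrArg₂ (· ++ ·) ?_ ?_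
    · exact List.map_congr_left (fun p _ => row_newline p.1 (PySem.Int.toStr p.2))
    · have hne : ((hc : Int) != 0) = (hc != 0) := by
        by_cases h : hc = 0
        · simp [h]
        · have h1 : (hc : Int) ≠ 0 := by exact_mod_cast h
          have e1 : ((hc : Int) != 0) = true := by simpa using h1
          have e2 : (hc != 0) = true := by simpa using h
          rw [e1, e2]
      rw [hne]
      by_cases h : (hc != 0) = true
      · rw [if_pos h, if_pos h]
        simp only [List.map_cons, List.map_nil]
        rw [hot_split, row_newline]
      · rw [if_neg h, if_neg h]
        rfl

-- ===== VERDICT (by name: the statement is the Claim_ definition above) =====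
theorem readme_sprint_velocity_spec : Claim_equal_readme_sprint_velocity := by
  intro items _
  unfold Spec_readme_sprint_velocity
  exact main_eq items
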